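-- pv_equiv track=rewrite | github.com/mikeb55/grand-criteria-of-excellence-jazz | OpenTriadEngine/chord_melody_engine/harmonisation.py | _force_melody_on_top
-- ===== SOURCE A (Python) =====
-- from typing import List, Tuple, Optional, Dict
--
-- def _force_melody_on_top(
--
--     triad_pitches: List[int],
--     melody_pitch: int
-- ) -> Tuple[List[int], int]:
--     """Force arrangement with melody on top."""
--     melody_pc = melody_pitch % 12
--
--     # Find which voice matches melody pitch class
--     for i, p in enumerate(triad_pitches):
--         if p % 12 == melody_pc:
--             # Rearrange so this voice is on top
--             new_pitches = [melody_pitch]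
--             for j, other_p in enumerate(triad_pitches):
--                 if j != i:
--                     # Place other notes below melody
--                     adjusted = other_p
--                     while adjusted >= melody_pitch:
--                         adjusted -= 12
--                     new_pitches.insert(0, adjusted)
--             return sorted(new_pitches), i
--
--     # If melody not in triad, just place triad below
--     adjusted = []
--     for p in triad_pitches:
--         while p >= melody_pitch:
--             p -= 12
--         adjusted.append(p)
--     return sorted(adjusted) + [melody_pitch], 0
-- ===== SOURCE B (Python) =====
-- def _force_melody_on_top(triad_pitches, melody_pitch):
--     """Force arrangement with melody on top (closed-form octave drop)."""
--     def drop(p):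
--         # unique value congruent to p mod 12 that is strictly below melody_pitch,
--         # unless p is already below (then p itself)
--         return p - 12 * max(0, (p - melody_pitch) // 12 + 1)
--
--     pcs = [p % 12 for p in triad_pitches]
--     target = melody_pitch % 12
--     if target in pcs:
--         i = pcs.index(target)
--         others = [drop(p) for j, p in enumerate(triad_pitches) if j != i]
--         return sorted(others + [melody_pitch]), i
--     return sorted([drop(p) for p in triad_pitches]) + [melody_pitch], 0
-- ===== Notes on version B (the rewrite author's own statement) =====
-- stated objective: faster
-- what changed: Replaces each iterative while-loop octave subtraction (time proportional to the pitch gap) with a closed-form floor-division drop, replaces the first-match scan by a pitch-class list plus .index lookup, and builds the rearranged voicing by a filtering comprehension instead of repeated insert(0, ...).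
import Mathlib
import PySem

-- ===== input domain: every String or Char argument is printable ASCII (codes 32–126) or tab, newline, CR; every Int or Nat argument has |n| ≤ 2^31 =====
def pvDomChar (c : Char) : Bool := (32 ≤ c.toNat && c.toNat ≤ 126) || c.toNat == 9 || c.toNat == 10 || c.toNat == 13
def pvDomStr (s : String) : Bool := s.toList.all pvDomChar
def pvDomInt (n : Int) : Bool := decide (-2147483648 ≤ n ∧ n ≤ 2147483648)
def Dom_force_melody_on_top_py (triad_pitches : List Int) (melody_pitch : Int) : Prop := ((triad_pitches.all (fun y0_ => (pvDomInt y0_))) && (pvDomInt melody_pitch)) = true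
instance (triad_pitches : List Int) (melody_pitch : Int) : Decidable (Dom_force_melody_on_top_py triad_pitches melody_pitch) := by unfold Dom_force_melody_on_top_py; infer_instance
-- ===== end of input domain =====

-- B replaces A's while-loop octave drops by a closed-form floor-division drop and the
-- first-match scan by pitch-class list + index lookup (objective: simpler).

-- ===== PORT A =====
-- while adjusted >= melody_pitch: adjusted -= 12
def dropLoopA (melody adjusted : Int) : Int :=
  if adjusted ≥ melody then dropLoopA melody (adjusted - 12) else adjusted
termination_by (adjusted - melody + 12).toNat
decreasing_by omega

-- the 'for i, p in enumerate(triad_pitches)' loop with its two returns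
def scanA (tp : List Int) (melody mpc : Int) : List (Int × Int) → List Int × Int
  | [] =>
    let adjusted := tp.foldl (fun acc p => acc ++ [dropLoopA melody p]) []
    (PySem.List.sorted adjusted (fun x => x) ++ [melody], 0)
  | (i, p) :: rest =>
    if PySem.Int.mod p 12 = mpc then
      let newPitches := (PySem.List.enumerate tp).foldl
        (fun acc jq => if jq.1 ≠ i then dropLoopA melody jq.2 :: acc else acc) [melody]
      (PySem.List.sorted newPitches (fun x => x), i)
    else scanA tp melody mpc rest

def force_melody_on_top_py (triad_pitches : List Int) (melody_pitch : Int) : List Int × Int :=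
  scanA triad_pitches melody_pitch (PySem.Int.mod melody_pitch 12)
    (PySem.List.enumerate triad_pitches)

-- ===== PORT B =====
-- closed-form drop: p - 12 * max(0, (p - melody_pitch) // 12 + 1)
def dropB (melody p : Int) : Int :=
  p - 12 * max 0 (PySem.Int.floordiv (p - melody) 12 + 1)

def force_melody_on_top_py_alt (triad_pitches : List Int) (melody_pitch : Int) : List Int × Int :=
  let pcs := triad_pitches.map (fun p => PySem.Int.mod p 12)
  let target := PySem.Int.mod melody_pitch 12
  match PySem.List.index? pcs target with
  | some i =>
      let others := ((PySem.List.enumerate triad_pitches).filter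
          (fun jp => jp.1 ≠ (i : Int))).map (fun jp => dropB melody_pitch jp.2)
      (PySem.List.sorted (others ++ [melody_pitch]) (fun x => x), (i : Int))
  | none =>
      (PySem.List.sorted (triad_pitches.map (dropB melody_pitch)) (fun x => x)
        ++ [melody_pitch], 0)

-- ===== PRECONDITION & SPEC =====
def Spec_force_melody_on_top_py (triad_pitches : List Int) (melody_pitch : Int) (out : List Int × Int) : Prop := out = force_melody_on_top_py_alt triad_pitches melody_pitch
instance (triad_pitches : List Int) (melody_pitch : Int) (out : List Int × Int) : Decidable (Spec_force_melody_on_top_py triad_pitches melody_pitch out) := by unfold Spec_force_melody_on_top_py; infer_instance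

-- ===== CLAIM (what is proved, stated in full; the proofs are below) =====
def Claim_equal_force_melody_on_top_py : Prop := ∀ (triad_pitches : List Int) (melody_pitch : Int), Dom_force_melody_on_top_py triad_pitches melody_pitch → Spec_force_melody_on_top_py triad_pitches melody_pitch (force_melody_on_top_py triad_pitches melody_pitch)

-- ===== LEMMAS AND PROOFS =====

theorem dropLoopA_eq (m p : Int) : dropLoopA m p = dropB m p := by
  unfold dropLoopA
  split
  · rename_i h
    rw [dropLoopA_eq m (p - 12)]
    unfold dropB
    rw [PySem.Int.floordiv_eq_ediv_of_pos (by omega : (0:Int) < 12),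
        PySem.Int.floordiv_eq_ediv_of_pos (by omega : (0:Int) < 12)]
    omega
  · rename_i h
    unfold dropB
    rw [PySem.Int.floordiv_eq_ediv_of_pos (by omega : (0:Int) < 12)]
    omega
termination_by (p - m + 12).toNat
decreasing_by omega

theorem foldl_consIf (m i : Int) (E : List (Int × Int)) (acc : List Int) :
    E.foldl (fun acc jq => if jq.1 ≠ i then dropLoopA m jq.2 :: acc else acc) acc =
    ((E.filter (fun jq => jq.1 ≠ i)).map (fun jq => dropB m jq.2)).reverse ++ acc := by
  induction E generalizing acc with
  | nil => simp
  | cons e E ih =>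
    rw [List.foldl_cons, ih, List.filter_cons]
    by_cases h : e.1 = i
    · simp [h]
    · simp [h, dropLoopA_eq]

theorem foldl_app (m : Int) (tp : List Int) (acc : List Int) :
    tp.foldl (fun acc p => acc ++ [dropLoopA m p]) acc = acc ++ tp.map (dropB m) := by
  induction tp generalizing acc with
  | nil => simp
  | cons p tp ih => rw [List.foldl_cons, ih]; simp [dropLoopA_eq]

theorem scanA_eq (tp : List Int) (m : Int) (suffix : List Int) (start : Int) :
    scanA tp m (PySem.Int.mod m 12) (PySem.List.enumerate suffix start) =
    (match PySem.List.index? (suffix.map (fun p => PySem.Int.mod p 12)) (PySem.Int.mod m 12) with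
     | some k =>
        (PySem.List.sorted ((PySem.List.enumerate tp).foldl
            (fun acc jq => if jq.1 ≠ (start + (k : Int)) then dropLoopA m jq.2 :: acc else acc)
            [m]) (fun x => x), start + (k : Int))
     | none =>
        (PySem.List.sorted (tp.foldl (fun acc p => acc ++ [dropLoopA m p]) []) (fun x => x)
          ++ [m], 0)) := by
  induction suffix generalizing start with
  | nil => simp [PySem.List.enumerate_nil, PySem.List.index?, scanA]
  | cons p rest ih =>
    rw [PySem.List.enumerate_cons, List.map_cons]
    by_cases h : PySem.Int.mod p 12 = PySem.Int.mod m 12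
    · rw [h, PySem.List.index?_cons_self]
      simp only [scanA]
      rw [if_pos h]
      simp only [Nat.cast_zero, add_zero]
    · rw [PySem.List.index?_cons_of_ne _ h]
      have hs : scanA tp m (PySem.Int.mod m 12) ((start, p) :: PySem.List.enumerate rest (start + 1))
          = scanA tp m (PySem.Int.mod m 12) (PySem.List.enumerate rest (start + 1)) := by
        simp only [scanA]
        rw [if_neg h]
      rw [hs, ih]
      cases hk : PySem.List.index? (rest.map (fun p => PySem.Int.mod p 12)) (PySem.Int.mod m 12) with
      | none => simp
      | some k =>
        simp only [Option.map_some]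
        have : start + 1 + (k : Int) = start + ((k + 1 : Nat) : Int) := by push_cast; ring
        rw [this]

theorem force_melody_on_top_py_eq (tp : List Int) (m : Int) :
    force_melody_on_top_py tp m = force_melody_on_top_py_alt tp m := by
  unfold force_melody_on_top_py force_melody_on_top_py_alt
  rw [scanA_eq tp m tp 0]
  dsimp only
  cases hk : PySem.List.index? (tp.map (fun p => PySem.Int.mod p 12)) (PySem.Int.mod m 12) with
  | none => rw [foldl_app]; rfl
  | some k =>
    simp only [zero_add]
    refine Prod.ext ?_ rfl
    show PySem.List.sorted _ (fun x => x) = PySem.List.sorted _ (fun x => x)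
    rw [foldl_consIf]
    apply PySem.List.sorted_eq_sorted_of_perm _ _ _ (fun a b hab => hab)
    exact (List.reverse_perm _).append_right _

-- ===== VERDICT (by name: the statement is the Claim_ definition above) =====
theorem force_melody_on_top_py_spec : Claim_equal_force_melody_on_top_py := by
  intro tp m _
  exact force_melody_on_top_py_eq tp m
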